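-- pv_equiv track=rewrite | github.com/e5sub/mark-six | api_mobile.py | _calc_common_entries
-- ===== SOURCE A (Python) =====
-- def _calc_common_entries(entries, match_value, odds):
--     profit = 0
--     total = 0
--     win = False
--     for value, amount in entries:
--         total += amount
--         if value == match_value:
--             win = True
--             profit += amount * odds - amount
--         else:
--             profit += -amount
--     return win, profit, total
-- ===== SOURCE B (Python) =====
-- def _calc_common_entries(entries, match_value, odds):
--     entries = list(entries)
--     total = sum(amount for _, amount in entries)
--     win = any(value == match_value for value, _ in entries)
--     win_sum = sum(amount for value, amount in entries if value == match_value)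
--     return win, odds * win_sum - total, total
-- ===== Notes on version B (the rewrite author's own statement) =====
-- stated objective: simpler
-- what changed: Replaces the single loop with mutating accumulators by three closed-form aggregates (sum, any, sum of matching amounts) and the identity profit = odds*win_sum - total.
import Mathlib
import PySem

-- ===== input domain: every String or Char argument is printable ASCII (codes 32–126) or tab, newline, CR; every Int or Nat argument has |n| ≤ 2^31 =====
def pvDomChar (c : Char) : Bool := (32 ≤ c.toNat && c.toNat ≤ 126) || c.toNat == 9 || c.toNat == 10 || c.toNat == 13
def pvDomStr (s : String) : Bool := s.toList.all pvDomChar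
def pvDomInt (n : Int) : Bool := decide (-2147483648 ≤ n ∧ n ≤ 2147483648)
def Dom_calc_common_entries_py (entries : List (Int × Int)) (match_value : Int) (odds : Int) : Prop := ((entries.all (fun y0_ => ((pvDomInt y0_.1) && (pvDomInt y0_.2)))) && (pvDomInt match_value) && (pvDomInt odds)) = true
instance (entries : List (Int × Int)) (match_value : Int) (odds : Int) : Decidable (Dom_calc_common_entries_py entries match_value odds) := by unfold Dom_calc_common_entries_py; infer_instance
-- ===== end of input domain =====

-- B replaces A's single accumulating loop by closed-form aggregates (total, any-match, matching sum) and profit = odds*win_sum - total; objective: simpler.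


-- ===== PORT A =====
-- A: one loop over entries, accumulating (profit, total, win) exactly as the Python does.
def calc_common_entries_py (entries : List (Int × Int)) (match_value : Int) (odds : Int) : Bool × Int × Int :=
  let st := entries.foldl
    (fun (st : Int × Int × Bool) p =>
      let profit := st.1; let total := st.2.1; let win := st.2.2
      let total := total + p.2
      if p.1 == match_value then (profit + (p.2 * odds - p.2), total, true)
      else (profit + (-p.2), total, win))
    (0, 0, false)
  (st.2.2, st.1, st.2.1)

-- ===== PORT B =====
-- B (simpler): three closed-form aggregates; profit = odds * win_sum - total.
def calc_common_entries_py_alt (entries : List (Int × Int)) (match_value : Int) (odds : Int) : Bool × Int × Int :=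
  let total := (entries.map (·.2)).sum
  let win := entries.any (fun p => p.1 == match_value)
  let win_sum := ((entries.filter (fun p => p.1 == match_value)).map (·.2)).sum
  (win, odds * win_sum - total, total)

-- ===== PRECONDITION & SPEC =====
def Spec_calc_common_entries_py (entries : List (Int × Int)) (match_value : Int) (odds : Int) (out : Bool × Int × Int) : Prop := out = calc_common_entries_py_alt entries match_value odds
instance (entries : List (Int × Int)) (match_value : Int) (odds : Int) (out : Bool × Int × Int) : Decidable (Spec_calc_common_entries_py entries match_value odds out) := by unfold Spec_calc_common_entries_py; infer_instance

-- ===== CLAIM (what is proved, stated in full; the proofs are below) =====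
def Claim_equal_calc_common_entries_py : Prop := ∀ (entries : List (Int × Int)) (match_value : Int) (odds : Int), Dom_calc_common_entries_py entries match_value odds → Spec_calc_common_entries_py entries match_value odds (calc_common_entries_py entries match_value odds)

-- ===== LEMMAS AND PROOFS =====

-- ===== VERDICT (by name: the statement is the Claim_ definition above) =====
lemma calc_loop_inv (match_value odds : Int) (entries : List (Int × Int))
    (profit total : Int) (win : Bool) :
    entries.foldl
      (fun (st : Int × Int × Bool) p =>
        if p.1 = match_value then (st.1 + (p.2 * odds - p.2), st.2.1 + p.2, true)
        else (st.1 + -p.2, st.2.1 + p.2, st.2.2))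
      (profit, total, win)
    = (profit + odds * ((entries.filter (fun p => p.1 == match_value)).map (·.2)).sum
         - (entries.map (·.2)).sum,
       total + (entries.map (·.2)).sum,
       win || entries.any (fun p => p.1 == match_value)) := by
  induction entries generalizing profit total win with
  | nil => simp
  | cons h t ih =>
    simp only [List.foldl_cons, List.filter_cons, List.map_cons, List.sum_cons, List.any_cons]
    by_cases hm : h.1 = match_value
    · simp only [hm, beq_self_eq_true, if_true, List.map_cons, List.sum_cons]
      rw [ih]
      simp only [Prod.mk.injEq]
      refine ⟨by ring, by ring, by simp⟩
    · simp only [beq_iff_eq, hm, if_false]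
      rw [ih]
      simp only [Prod.mk.injEq]
      refine ⟨by ring, by ring, ?_⟩
      have hb : (h.1 == match_value) = false := by simp [hm]
      rw [hb, Bool.false_or]

-- ===== VERDICT (by name: the statement is the Claim_ definition above) =====
theorem calc_common_entries_py_spec : Claim_equal_calc_common_entries_py := by
  intro entries match_value odds _
  unfold Spec_calc_common_entries_py calc_common_entries_py calc_common_entries_py_alt
  rw [show (fun (st : Int × Int × Bool) (p : Int × Int) =>
        let profit := st.1; let total := st.2.1; let win := st.2.2
        let total := total + p.2
        if p.1 == match_value then (profit + (p.2 * odds - p.2), total, true)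
        else (profit + (-p.2), total, win))
      = (fun (st : Int × Int × Bool) p =>
        if p.1 = match_value then (st.1 + (p.2 * odds - p.2), st.2.1 + p.2, true)
        else (st.1 + -p.2, st.2.1 + p.2, st.2.2)) from by
        funext st p; by_cases h : p.1 = match_value <;> simp [h]]
  rw [calc_loop_inv]
  simp
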